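-- pv_equiv track=rewrite | github.com/doublemover/Slopjective-C | scripts/check_objc3c_runnable_developer_tooling_end_to_end.py | extract_last_output_value
-- ===== SOURCE A (Python) =====
-- def extract_last_output_value(stdout: str, key: str) -> str | None:
--     prefix = f"{key}:"
--     value: str | None = None
--     for raw_line in stdout.splitlines():
--         line = raw_line.strip()
--         if line.startswith(prefix):
--             value = line.split(":", 1)[1].strip()
--     return value
-- ===== SOURCE B (Python) =====
-- def extract_last_output_value(stdout: str, key: str) -> str | None:
--     prefix = f"{key}:"
--     return next(
--         (line.split(":", 1)[1].strip()
--          for line in map(str.strip, reversed(stdout.splitlines()))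
--          if line.startswith(prefix)),
--         None,
--     )
-- ===== Notes on version B (the rewrite author's own statement) =====
-- stated objective: idiomatic
-- what changed: Replaces the forward scan that keeps overwriting an accumulator with a reverse scan that returns the first (i.e. last) matching line's value immediately, via a generator with next(..., None).
import Mathlib
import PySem

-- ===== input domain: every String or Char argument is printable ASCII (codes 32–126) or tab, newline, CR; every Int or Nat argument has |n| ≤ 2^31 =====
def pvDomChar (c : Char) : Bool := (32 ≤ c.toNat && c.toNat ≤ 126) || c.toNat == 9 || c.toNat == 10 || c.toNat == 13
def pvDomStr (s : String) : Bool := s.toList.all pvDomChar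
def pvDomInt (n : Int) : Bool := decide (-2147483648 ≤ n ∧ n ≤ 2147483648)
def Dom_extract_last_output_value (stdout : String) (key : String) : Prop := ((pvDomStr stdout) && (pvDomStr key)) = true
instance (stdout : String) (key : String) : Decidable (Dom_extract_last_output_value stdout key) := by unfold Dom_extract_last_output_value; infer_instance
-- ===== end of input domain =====

-- B replaces A's forward scan with an overwritten accumulator by an idiomatic reverse
-- scan returning the first (= last) matching line's value immediately.

-- ===== PORT A =====
-- A: forward fold over the lines, overwriting `value` on every matching line.
def extract_last_output_value (stdout : String) (key : String) : Option String :=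
  let pfx := key ++ ":"
  (PySem.Str.splitlines stdout).foldl
    (fun value rawLine =>
      let line := PySem.Str.strip rawLine
      if PySem.Str.startswith line pfx then
        -- line.split(":", 1)[1]; the index is always in range since `line` starts with `pfx`
        -- which ends in ':' (the `none` branch is unreachable)
        match ((PySem.Str.splitMax? line ":" 1).getD [])[1]? with
        | some v => some (PySem.Str.strip v)
        | none => none
      else value)
    none

-- ===== PORT B =====
-- B: first hit in the reversed list of stripped lines, early return.
def pvFindRev (pfx : String) : List String → Option String
  | [] => none
  | line :: rest =>
    if PySem.Str.startswith line pfx then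
      match ((PySem.Str.splitMax? line ":" 1).getD [])[1]? with
      | some v => some (PySem.Str.strip v)
      | none => none
    else pvFindRev pfx rest

def extract_last_output_value_alt (stdout : String) (key : String) : Option String :=
  pvFindRev (key ++ ":") (((PySem.Str.splitlines stdout).map PySem.Str.strip).reverse)

-- ===== PRECONDITION & SPEC =====
def Spec_extract_last_output_value (stdout : String) (key : String) (out : Option String) : Prop := out = extract_last_output_value_alt stdout key
instance (stdout : String) (key : String) (out : Option String) : Decidable (Spec_extract_last_output_value stdout key out) := by unfold Spec_extract_last_output_value; infer_instance

-- ===== CLAIM (what is proved, stated in full; the proofs are below) =====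
def Claim_equal_extract_last_output_value : Prop := ∀ (stdout : String) (key : String), Dom_extract_last_output_value stdout key → Spec_extract_last_output_value stdout key (extract_last_output_value stdout key)

-- ===== LEMMAS AND PROOFS =====

-- the last-match-wins forward fold equals the first hit of the reversed stripped lines
theorem foldl_eq_findRev (pfx : String) (L : List String) :
    L.foldl
      (fun value rawLine =>
        let line := PySem.Str.strip rawLine
        if PySem.Str.startswith line pfx then
          match ((PySem.Str.splitMax? line ":" 1).getD [])[1]? with
          | some v => some (PySem.Str.strip v)
          | none => none
        else value)
      none
    = pvFindRev pfx ((L.map PySem.Str.strip).reverse) := by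
  induction L using List.reverseRecOn with
  | nil => rfl
  | append_singleton M a ih =>
    simp only [List.foldl_append, List.foldl_cons, List.foldl_nil,
      List.map_append, List.map_cons, List.map_nil, List.reverse_append,
      List.reverse_cons, List.reverse_nil, List.nil_append, List.cons_append]
    rw [ih]
    simp only [pvFindRev]

-- ===== VERDICT (by name: the statement is the Claim_ definition above) =====
theorem extract_last_output_value_spec : Claim_equal_extract_last_output_value := by
  intro stdout key _
  unfold Spec_extract_last_output_value extract_last_output_value extract_last_output_value_alt
  exact foldl_eq_findRev (key ++ ":") (PySem.Str.splitlines stdout)
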